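-- pv_equiv track=rewrite | github.com/RdoubleA/torchtune | torchtune/data/tokenizers/_tiktoken.py | _split_long_repetitions
-- ===== SOURCE A (Python) =====
-- from typing import Dict, Iterator, List
--
-- def _split_long_repetitions(
--     s: str, max_consecutive_slice_len: int
-- ) -> Iterator[str]:
--     """
--     Split the string `s` so that each substring contains no more than `max_consecutive_slice_len`
--     consecutive whitespaces or consecutive non-whitespaces
--     """
--     current_slice_len = 0
--     current_slice_is_space = s[0].isspace() if len(s) > 0 else False
--     slice_start = 0
--
--     for i in range(len(s)):
--         is_now_space = s[i].isspace()
--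
--         if current_slice_is_space ^ is_now_space:
--             current_slice_len = 1
--             current_slice_is_space = is_now_space
--         else:
--             current_slice_len += 1
--             if current_slice_len > max_consecutive_slice_len:
--                 yield s[slice_start:i]
--                 slice_start = i
--                 current_slice_len = 1
--     yield s[slice_start:]
-- ===== SOURCE B (Python) =====
-- from itertools import groupby
--
-- def _split_long_repetitions(s, max_consecutive_slice_len):
--     """Run-based reimplementation: compute all cut positions from maximal
--     same-class runs, then emit slices between consecutive cuts."""
--     cuts = []
--     p = 0
--     for _, run in groupby(s, key=str.isspace):
--         length = sum(1 for _ in run)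
--         c = p + max_consecutive_slice_len
--         while c < p + length:
--             cuts.append(c)
--             c += max_consecutive_slice_len
--         p += length
--     prev = 0
--     for c in cuts:
--         yield s[prev:c]
--         prev = c
--     yield s[prev:]
-- ===== Notes on version B (the rewrite author's own statement) =====
-- stated objective: alternative
-- what changed: A's single char-by-char state machine (slice length counter, class flag, slice start) is replaced by a run-based decomposition: itertools.groupby yields the maximal same-class runs, each run contributes its arithmetic cut positions p+max, p+2*max, ..., and the output slices are then emitted between consecutive cuts.
-- outside the precondition, e.g. on _split_long_repetitions('ab', 0): A returns ['', 'a', 'b'], B does not finish within the time limit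
import Mathlib
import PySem

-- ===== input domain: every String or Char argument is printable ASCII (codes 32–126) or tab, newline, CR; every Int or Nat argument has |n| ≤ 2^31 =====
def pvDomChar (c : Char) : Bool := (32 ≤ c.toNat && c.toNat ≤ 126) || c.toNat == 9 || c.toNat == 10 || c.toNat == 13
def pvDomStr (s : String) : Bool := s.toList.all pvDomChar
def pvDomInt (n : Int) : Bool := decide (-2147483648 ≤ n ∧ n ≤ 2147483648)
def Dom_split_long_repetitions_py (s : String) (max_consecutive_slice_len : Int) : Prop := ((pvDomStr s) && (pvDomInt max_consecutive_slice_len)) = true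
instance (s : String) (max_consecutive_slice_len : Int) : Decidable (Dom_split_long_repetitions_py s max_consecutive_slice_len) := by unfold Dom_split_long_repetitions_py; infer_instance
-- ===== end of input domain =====

-- B replaces A's char-by-char state machine by a run-based decomposition: it computes
-- all cut positions from the maximal same-class runs and then emits the slices between
-- consecutive cuts (objective: alternative decomposition, same asymptotic cost).


-- ===== PORT A =====
-- loop state: (current_slice_len, current_slice_is_space, slice_start, yielded so far)
def pvStepA (s : List Char) (maxLen : Int)
    (st : Int × Bool × Int × List String) (i : Int) : Int × Bool × Int × List String :=
  let is_now := PySem.Chars.isspace (PySem.List.pyGetD s i ' ')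
  if Bool.xor st.2.1 is_now then
    (1, is_now, st.2.2.1, st.2.2.2)
  else
    let len' := st.1 + 1
    if len' > maxLen then
      (1, st.2.1, i, st.2.2.2 ++ [String.ofList (PySem.List.slice s (some st.2.2.1) (some i))])
    else
      (len', st.2.1, st.2.2.1, st.2.2.2)

def split_long_repetitions_py (s : String) (max_consecutive_slice_len : Int) : List String :=
  let l := s.toList
  -- current_slice_is_space = s[0].isspace() if len(s) > 0 else False
  let init_is_space := if 0 < l.length then PySem.Chars.isspace l.headI else false
  let st := (PySem.List.pyRange 0 (PySem.List.len l) 1).foldl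
    (pvStepA l max_consecutive_slice_len) (0, init_is_space, 0, [])
  st.2.2.2 ++ [String.ofList (PySem.List.slice l (some st.2.2.1) none)]

-- ===== PORT B =====
-- the while loop 'c = p+max; while c < p+length: cuts.append(c); c += max' of Source B
-- (the 'step ≤ 0' guard only makes the recursion total; Pre_ rules that case out)
def pvCutsLoop (c stop step : Int) : List Int :=
  if _h : step ≤ 0 ∨ stop ≤ c then []
  else c :: pvCutsLoop (c + step) stop step
termination_by (stop - c).toNat
decreasing_by omega

def split_long_repetitions_py_alt (s : String) (max_consecutive_slice_len : Int) : List String :=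
  let l := s.toList
  -- for _, run in groupby(s, key=str.isspace): length = len(run); cuts += [p+max, p+2*max, ...) ∩ [·, p+length)
  let runs := (l.splitBy (fun a b => PySem.Chars.isspace a == PySem.Chars.isspace b)).map
    (fun r => (r.length : Int))
  let pc := runs.foldl
    (fun (st : Int × List Int) L =>
      (st.1 + L, st.2 ++ pvCutsLoop (st.1 + max_consecutive_slice_len) (st.1 + L) max_consecutive_slice_len))
    (0, [])
  -- prev = 0; for c in cuts: yield s[prev:c]; prev = c
  let fin := pc.2.foldl
    (fun (st : Int × List String) c =>
      (c, st.2 ++ [String.ofList (PySem.List.slice l (some st.1) (some c))]))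
    (0, [])
  -- yield s[prev:]
  fin.2 ++ [String.ofList (PySem.List.slice l (some fin.1) none)]

-- ===== PRECONDITION & SPEC =====
-- Pre_ excludes max_consecutive_slice_len < 1, where A still returns but yields a degenerate
-- stream of empty/one-run slices (a cut at every character of a run) that no caller would
-- specify, and B's run-cutting generator does not terminate there.
def Pre_split_long_repetitions_py (s : String) (max_consecutive_slice_len : Int) : Prop :=
  1 ≤ max_consecutive_slice_len
instance (s : String) (max_consecutive_slice_len : Int) : Decidable (Pre_split_long_repetitions_py s max_consecutive_slice_len) := by unfold Pre_split_long_repetitions_py; infer_instance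

def pvWitness_split_long_repetitions_py : String × Int := ("aaa  b", 2)

def Spec_split_long_repetitions_py (s : String) (max_consecutive_slice_len : Int) (out : List String) : Prop := out = split_long_repetitions_py_alt s max_consecutive_slice_len
instance (s : String) (max_consecutive_slice_len : Int) (out : List String) : Decidable (Spec_split_long_repetitions_py s max_consecutive_slice_len out) := by unfold Spec_split_long_repetitions_py; infer_instance

-- ===== CLAIM (what is proved, stated in full; the proofs are below) =====
def Claim_equal_split_long_repetitions_py : Prop := ∀ (s : String) (max_consecutive_slice_len : Int), Dom_split_long_repetitions_py s max_consecutive_slice_len → Pre_split_long_repetitions_py s max_consecutive_slice_len → Spec_split_long_repetitions_py s max_consecutive_slice_len (split_long_repetitions_py s max_consecutive_slice_len)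

-- ===== LEMMAS AND PROOFS =====

-- slices of l between consecutive cut positions, starting from prev
def pvSliceAcc (l : List Char) (prev : Int) : List Int → List String
  | [] => []
  | c :: cs => String.ofList (PySem.List.slice l (some prev) (some c)) :: pvSliceAcc l c cs

-- the last cut, or prev if there is none
def pvLastD (prev : Int) : List Int → Int
  | [] => prev
  | c :: cs => pvLastD c cs

-- all cut positions of the runs rs when the first run starts at position p
def pvCutsRuns (m : Int) : Int → List (List Char) → List Int
  | _, [] => []
  | p, run :: rest => pvCutsLoop (p + m) (p + run.length) m ++ pvCutsRuns m (p + run.length) rest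

theorem pvSliceAcc_append (l : List Char) (prev : Int) (xs ys : List Int) :
    pvSliceAcc l prev (xs ++ ys) = pvSliceAcc l prev xs ++ pvSliceAcc l (pvLastD prev xs) ys := by
  induction xs generalizing prev with
  | nil => rfl
  | cons c cs ih => simp [pvSliceAcc, pvLastD, ih]

theorem pvLastD_append (prev : Int) (xs ys : List Int) :
    pvLastD prev (xs ++ ys) = pvLastD (pvLastD prev xs) ys := by
  induction xs generalizing prev with
  | nil => rfl
  | cons c cs ih => simp [pvLastD, ih]

-- B's first fold computes pvCutsRuns
theorem pvAltCutsFold (m : Int) (rs : List (List Char)) (p : Int) (cs : List Int) :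
    (rs.map (fun r => (r.length : Int))).foldl
      (fun (st : Int × List Int) L => (st.1 + L, st.2 ++ pvCutsLoop (st.1 + m) (st.1 + L) m))
      (p, cs)
    = (p + ((rs.map (fun r => (r.length : Int))).sum), cs ++ pvCutsRuns m p rs) := by
  induction rs generalizing p cs with
  | nil => simp [pvCutsRuns]
  | cons r rest ih => simp [pvCutsRuns, ih, add_assoc]

-- B's second fold computes pvSliceAcc / pvLastD
theorem pvAltSliceFold (l : List Char) (cuts : List Int) (prev : Int) (out : List String) :
    cuts.foldl
      (fun (st : Int × List String) c =>
        (c, st.2 ++ [String.ofList (PySem.List.slice l (some st.1) (some c))]))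
      (prev, out)
    = (pvLastD prev cuts, out ++ pvSliceAcc l prev cuts) := by
  induction cuts generalizing prev out with
  | nil => simp [pvLastD, pvSliceAcc]
  | cons c cs ih => simp [pvLastD, pvSliceAcc, ih]

-- every element of an IsChain-(isspace-equal) run has the class of its head
theorem pvRunUniform (run : List Char)
    (h : run.IsChain (fun x y => PySem.Chars.isspace x == PySem.Chars.isspace y)) :
    ∀ c ∈ run, PySem.Chars.isspace c = PySem.Chars.isspace (run.headI) := by
  induction run with
  | nil => simp
  | cons a rest ih =>
    rw [List.isChain_cons] at h
    intro c hc
    rcases List.mem_cons.1 hc with rfl | hc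
    · rfl
    · cases rest with
      | nil => cases hc
      | cons d rest' =>
        have hda : PySem.Chars.isspace a = PySem.Chars.isspace d := by
          have := h.1 d rfl; simpa using this
        have := ih h.2 c hc
        simp only [List.headI] at this ⊢
        rw [this, hda]


-- inner loop: folding A's step over one run tail
theorem pvInner (l : List Char) (m : Int) (hm : 1 ≤ m) (b : Bool) :
    ∀ (rest : List Char) (p len ss : Int) (acc : List String),
      1 ≤ len → len ≤ m → (∀ c ∈ rest, PySem.Chars.isspace c = b) →
      (∀ (k : Nat), k < rest.length → PySem.List.pyGetD l (p + k) ' ' = rest.getD k ' ') →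
      ∃ len',
        (PySem.List.pyRange p (p + rest.length) 1).foldl (pvStepA l m) (len, b, ss, acc)
        = (len', b, pvLastD ss (pvCutsLoop (p + m - len) (p + rest.length) m),
           acc ++ pvSliceAcc l ss (pvCutsLoop (p + m - len) (p + rest.length) m)) := by
  intro rest
  induction rest with
  | nil =>
    intro p len ss acc h1 h2 _ _
    refine ⟨len, ?_⟩
    rw [show ((p : Int) + ([] : List Char).length = p) by simp,
        PySem.List.pyRange_one_eq_nil (le_refl p),
        pvCutsLoop, dif_pos (Or.inr (by omega))]
    simp [pvLastD, pvSliceAcc]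
  | cons c rest' ih =>
    intro p len ss acc h1 h2 hclass hget
    have hlen : ((c :: rest').length : Int) = (rest'.length : Int) + 1 := by push_cast [List.length_cons]; ring
    have hcons : PySem.List.pyRange p (p + ((c :: rest').length : Int)) 1
        = p :: PySem.List.pyRange (p + 1) (p + ((c :: rest').length : Int)) 1 :=
      PySem.List.pyRange_one_cons (by omega)
    have hget0 : PySem.List.pyGetD l p ' ' = c := by
      have := hget 0 (by simp)
      simpa using this
    have hspc : PySem.Chars.isspace c = b := hclass c List.mem_cons_self
    rw [hcons, List.foldl_cons]
    have hxor : Bool.xor b (PySem.Chars.isspace (PySem.List.pyGetD l p ' ')) = false := by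
      rw [hget0, hspc]; simp
    by_cases hcase : len + 1 > m
    · -- cut at p
      have hlm : len = m := by omega
      have hstep : pvStepA l m (len, b, ss, acc) p
          = (1, b, p, acc ++ [String.ofList (PySem.List.slice l (some ss) (some p))]) := by
        simp [pvStepA, hxor, hcase]
      rw [hstep]
      have hcuts : pvCutsLoop (p + m - len) (p + ((c :: rest').length : Int)) m
          = p :: pvCutsLoop (p + m) (p + ((c :: rest').length : Int)) m := by
        rw [show (p + m - len = p) by omega]
        rw [pvCutsLoop, dif_neg (by push_neg; constructor <;> omega)]
      obtain ⟨len', hfin⟩ := ih (p + 1) 1 p (acc ++ [String.ofList (PySem.List.slice l (some ss) (some p))])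
        (by omega) hm (fun c' hc' => hclass c' (List.mem_cons_of_mem _ hc'))
        (fun k hk => by
          have := hget (k + 1) (by simpa using Nat.succ_lt_succ hk)
          rw [show ((p : Int) + ((k : Nat) + 1 : Nat) = p + 1 + k) by push_cast; ring] at this
          simpa using this)
      refine ⟨len', ?_⟩
      rw [show ((p : Int) + 1 + (rest'.length : Int) = p + ((c :: rest').length : Int)) by rw [hlen]; ring,
          show ((p : Int) + 1 + m - 1 = p + m) by ring] at hfin
      rw [hfin, hcuts]
      simp [pvLastD, pvSliceAcc]
    · -- no cut
      have hstep : pvStepA l m (len, b, ss, acc) p = (len + 1, b, ss, acc) := by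
        simp [pvStepA, hxor, hcase]
      rw [hstep]
      obtain ⟨len', hfin⟩ := ih (p + 1) (len + 1) ss acc
        (by omega) (by omega) (fun c' hc' => hclass c' (List.mem_cons_of_mem _ hc'))
        (fun k hk => by
          have := hget (k + 1) (by simpa using Nat.succ_lt_succ hk)
          rw [show ((p : Int) + ((k : Nat) + 1 : Nat) = p + 1 + k) by push_cast; ring] at this
          simpa using this)
      refine ⟨len', ?_⟩
      rw [show ((p : Int) + 1 + (rest'.length : Int) = p + ((c :: rest').length : Int)) by rw [hlen]; ring,
          show ((p : Int) + 1 + m - (len + 1) = p + m - len) by ring] at hfin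
      exact hfin

-- outer loop: folding A's step over a list of runs
theorem pvOuter (l : List Char) (m : Int) (hm : 1 ≤ m) :
    ∀ (rs : List (List Char)) (p : Int) (flag : Bool) (len ss : Int) (acc : List String),
      [] ∉ rs →
      (∀ r ∈ rs, r.IsChain (fun x y => PySem.Chars.isspace x == PySem.Chars.isspace y)) →
      rs.IsChain (fun a b => ∃ ha hb,
        (PySem.Chars.isspace (a.getLast ha) == PySem.Chars.isspace (b.head hb)) = false) →
      (∀ r ∈ rs.head?, flag ≠ PySem.Chars.isspace r.headI ∨ len = 0) →
      (∀ (k : Nat), k < rs.flatten.length → PySem.List.pyGetD l (p + k) ' ' = rs.flatten.getD k ' ') →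
      ∃ len' flag',
        (PySem.List.pyRange p (p + rs.flatten.length) 1).foldl (pvStepA l m) (len, flag, ss, acc)
        = (len', flag', pvLastD ss (pvCutsRuns m p rs),
           acc ++ pvSliceAcc l ss (pvCutsRuns m p rs)) := by
  intro rs
  induction rs with
  | nil =>
    intro p flag len ss acc _ _ _ _ _
    refine ⟨len, flag, ?_⟩
    simp [PySem.List.pyRange_one_eq_nil (le_refl p), pvCutsRuns, pvLastD, pvSliceAcc]
  | cons run rest ih =>
    intro p flag len ss acc hnil hchains halt hflag hget
    cases run with
    | nil => exact absurd List.mem_cons_self hnil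
    | cons c runTail =>
    have hrunU := pvRunUniform _ (hchains _ List.mem_cons_self)
    have hlenflat : (((c :: runTail) :: rest).flatten.length : Int)
        = 1 + (runTail.length : Int) + (rest.flatten.length : Int) := by
      simp only [List.flatten_cons, List.length_append, List.length_cons]; push_cast; ring
    have hsplit : PySem.List.pyRange p (p + (((c :: runTail) :: rest).flatten.length : Int)) 1
        = PySem.List.pyRange p (p + 1 + (runTail.length : Int)) 1
          ++ PySem.List.pyRange (p + 1 + (runTail.length : Int)) (p + (((c :: runTail) :: rest).flatten.length : Int)) 1 := by
      apply PySem.List.pyRange_one_append <;> omega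
    have hcons : PySem.List.pyRange p (p + 1 + (runTail.length : Int)) 1
        = p :: PySem.List.pyRange (p + 1) (p + 1 + (runTail.length : Int)) 1 :=
      PySem.List.pyRange_one_cons (by omega)
    have hget0 : PySem.List.pyGetD l p ' ' = c := by
      have := hget 0 (by simp)
      simpa using this
    -- first character of the run brings the state to (1, isspace c, ss, acc)
    have hstep : pvStepA l m (len, flag, ss, acc) p = (1, PySem.Chars.isspace c, ss, acc) := by
      by_cases hfb : flag = PySem.Chars.isspace c
      · have h0 : len = 0 := by
          rcases hflag _ rfl with hne | h0
          · exact absurd hfb (by simpa [List.headI] using hne)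
          · exact h0
        have hxor : Bool.xor flag (PySem.Chars.isspace (PySem.List.pyGetD l p ' ')) = false := by
          rw [hget0, hfb]; simp
        simp [pvStepA, hxor, h0, hfb, hget0, show ¬ (m < 1) by omega]
      · have hxor : Bool.xor flag (PySem.Chars.isspace (PySem.List.pyGetD l p ' ')) = true := by
          rw [hget0]; revert hfb; cases flag <;> cases (PySem.Chars.isspace c) <;> simp
        simp [pvStepA, hxor, hget0, hfb]
    -- inner lemma over the tail of the run
    obtain ⟨len1, hrun⟩ := pvInner l m hm (PySem.Chars.isspace c) runTail (p + 1) 1 ss acc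
      (le_refl 1) hm
      (fun c' hc' => by
        have := hrunU c' (List.mem_cons_of_mem _ hc')
        simpa [List.headI] using this)
      (fun k hk => by
        have hk' : k + 1 < ((c :: runTail) :: rest).flatten.length := by
          simp only [List.flatten_cons, List.length_append, List.length_cons]; omega
        have := hget (k + 1) hk'
        rw [show ((p : Int) + ((k + 1 : Nat) : Int) = p + 1 + k) by push_cast; ring] at this
        rw [this]
        show (((c :: runTail) ++ rest.flatten).getD (k+1) ' ') = _
        simp [List.getD, List.getElem?_append_left (by simpa using Nat.succ_lt_succ hk)])
    -- outer induction hypothesis over the remaining runs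
    obtain ⟨len2, flag2, hrest⟩ := ih (p + 1 + (runTail.length : Int)) (PySem.Chars.isspace c) len1
      (pvLastD ss (pvCutsLoop (p + 1 + m - 1) (p + 1 + (runTail.length : Int)) m))
      (acc ++ pvSliceAcc l ss (pvCutsLoop (p + 1 + m - 1) (p + 1 + (runTail.length : Int)) m))
      (fun h => hnil (List.mem_cons_of_mem _ h))
      (fun r hr => hchains r (List.mem_cons_of_mem _ hr))
      ((List.isChain_cons.mp halt).2)
      (by
        intro r hr
        left
        obtain ⟨ha, hb', hfalse⟩ := (List.isChain_cons.mp halt).1 r hr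
        have h1 : PySem.Chars.isspace ((c :: runTail).getLast ha) = PySem.Chars.isspace c := by
          simpa [List.headI] using hrunU _ (List.getLast_mem ha)
        have h2 : r.head hb' = r.headI := by
          cases r with | nil => exact absurd rfl hb' | cons x xs => rfl
        rw [h1, h2] at hfalse
        simpa using hfalse)
      (fun k hk => by
        have hk' : (c :: runTail).length + k < ((c :: runTail) :: rest).flatten.length := by
          simp only [List.flatten_cons, List.length_append, List.length_cons]; omega
        have := hget ((c :: runTail).length + k) hk'
        rw [show ((p : Int) + (((c :: runTail).length + k : Nat) : Int) = p + 1 + (runTail.length : Int) + k) by push_cast [List.length_cons]; ring] at this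
        rw [this]
        show (((c :: runTail) ++ rest.flatten).getD ((c :: runTail).length + k) ' ') = _
        rw [List.getD, List.getElem?_append_right (Nat.le_add_right _ _), Nat.add_sub_cancel_left]
        rfl)
    refine ⟨len2, flag2, ?_⟩
    rw [show (p + (((c :: runTail) :: rest).flatten.length : Int)) = p + 1 + (runTail.length : Int) + (rest.flatten.length : Int) by rw [hlenflat]; ring] at hsplit ⊢
    rw [hsplit, List.foldl_append, hcons, List.foldl_cons, hstep, hrun, hrest]
    have hcr : pvCutsRuns m p ((c :: runTail) :: rest)
        = pvCutsLoop (p + 1 + m - 1) (p + 1 + (runTail.length : Int)) m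
          ++ pvCutsRuns m (p + 1 + (runTail.length : Int)) rest := by
      show pvCutsLoop (p + m) (p + ((c :: runTail).length : Int)) m ++ pvCutsRuns m (p + ((c :: runTail).length : Int)) rest = _
      rw [show ((p : Int) + ((c :: runTail).length : Int) = p + 1 + (runTail.length : Int)) by push_cast [List.length_cons]; ring,
          show ((p : Int) + m = p + 1 + m - 1) by ring]
    rw [hcr, pvSliceAcc_append, pvLastD_append, List.append_assoc]

-- ===== VERDICT (by name: the statement is the Claim_ definition above) =====
theorem split_long_repetitions_py_spec : Claim_equal_split_long_repetitions_py := by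
  intro s m _ hpre
  unfold Spec_split_long_repetitions_py
  unfold split_long_repetitions_py split_long_repetitions_py_alt
  have hpre' : (1 : Int) ≤ m := hpre
  set l := s.toList with hl
  set rs := l.splitBy (fun a b => PySem.Chars.isspace a == PySem.Chars.isspace b) with hrs
  obtain ⟨hfl, hnil, hch, halt⟩ := List.splitBy_eq_iff.mp hrs.symm
  have hget : ∀ (k : Nat), k < rs.flatten.length →
      PySem.List.pyGetD l ((0 : Int) + k) ' ' = rs.flatten.getD k ' ' := by
    intro k hk
    rw [← hfl]
    simp
  set flag0 := if 0 < l.length then PySem.Chars.isspace l.headI else false with hflag0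
  obtain ⟨len', flag', hA⟩ := pvOuter l m hpre'
    rs 0 flag0 0 0 [] hnil hch halt
    (fun _ _ => Or.inr rfl) hget
  rw [show ((0 : Int) + (rs.flatten.length : Int)) = PySem.List.len l by
        rw [← hfl]; simp] at hA
  simp only []
  rw [hA, pvAltCutsFold, pvAltSliceFold]
  simp
  exact ⟨by rw [← hrs], by rw [← hrs]⟩
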